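-- pv_equiv track=rewrite | github.com/leenjewel/openssl_for_ios_and_android | android-ndk-r21d/build/ldflags_to_sanitizers.py | sanitizers_from_args
-- ===== SOURCE A (Python) =====
-- def sanitizers_from_args(args):
--     """Returns the sanitizers enabled by a given set of ldflags."""
--     sanitizers = set()
--     for arg in args:
--         if arg.startswith('-fsanitize='):
--             sanitizer_list = arg.partition('=')[2]
--             sanitizers |= set(sanitizer_list.split(','))
--         elif arg.startswith('-fno-sanitize='):
--             sanitizer_list = arg.partition('=')[2]
--             sanitizers -= set(sanitizer_list.split(','))
--     return sorted(list(sanitizers))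
-- ===== SOURCE B (Python) =====
-- def sanitizers_from_args(args):
--     """Returns the sanitizers enabled by a given set of ldflags."""
--     # Backward scan: the LAST flag mentioning a name wins, so walk the args
--     # in reverse and let the FIRST decision seen for each name stand.
--     decided = set()
--     enabled = []
--     for arg in reversed(args):
--         if arg.startswith('-fsanitize='):
--             on = True
--         elif arg.startswith('-fno-sanitize='):
--             on = False
--         else:
--             continue
--         for name in arg.partition('=')[2].split(','):
--             if name not in decided:
--                 decided.add(name)
--                 if on:
--                     enabled.append(name)
--     return sorted(enabled)
-- ===== Notes on version B (the rewrite author's own statement) =====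
-- stated objective: alternative
-- what changed: Scans the args backward with a decided-set and an appended enabled-list (the first decision seen in reverse order wins), instead of A's forward accumulation by set union/difference.
import Mathlib
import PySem

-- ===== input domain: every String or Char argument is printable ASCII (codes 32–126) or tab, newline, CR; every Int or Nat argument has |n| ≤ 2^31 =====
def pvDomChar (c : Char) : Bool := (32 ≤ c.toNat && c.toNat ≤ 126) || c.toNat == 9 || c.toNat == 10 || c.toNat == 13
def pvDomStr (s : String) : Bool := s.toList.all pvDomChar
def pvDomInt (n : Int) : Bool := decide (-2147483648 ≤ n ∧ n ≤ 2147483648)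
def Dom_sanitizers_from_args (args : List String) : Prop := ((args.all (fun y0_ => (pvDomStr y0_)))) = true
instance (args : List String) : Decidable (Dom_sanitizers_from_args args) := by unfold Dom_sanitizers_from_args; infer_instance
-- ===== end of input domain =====

-- B scans the args BACKWARD with a decided-set and an enabled-list (first decision seen in
-- reverse order wins), instead of A's forward set union/difference; alternative structure, same results.

-- ===== PORT A =====
-- s.split(',') (sep nonempty): exact via Chars.splitOn
def pySplitComma (s : String) : List String :=
  (PySem.Chars.splitOn s.toList [',']).map String.mk

-- arg.partition('=')[2]: everything after the FIRST '=', '' if there is no '=' (exact hand port; PySem has no partition)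
def pyPartitionAfterEq (s : String) : String :=
  String.mk ((s.toList.dropWhile (fun c => c != '=')).drop 1)

def stepA (s : PySem.Set String) (arg : String) : PySem.Set String :=
  if PySem.Str.startswith arg "-fsanitize=" then
    PySem.Set.union s (PySem.Set.ofList (pySplitComma (pyPartitionAfterEq arg)))
  else if PySem.Str.startswith arg "-fno-sanitize=" then
    PySem.Set.diff s (PySem.Set.ofList (pySplitComma (pyPartitionAfterEq arg)))
  else s

def sanitizers_from_args (args : List String) : List String :=
  PySem.List.sorted (args.foldl stepA PySem.Set.empty) (fun x => x) false

-- ===== PORT B =====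
-- the inner 'for name in …' loop of Source B: decide every not-yet-decided name with polarity `on`
def decideNames (on : Bool) (st : PySem.Set String × List String) (ns : List String) :
    PySem.Set String × List String :=
  ns.foldl (fun st name =>
    if PySem.Set.contains st.1 name then st
    else (PySem.Set.add st.1 name, if on then st.2 ++ [name] else st.2)) st

def stepB (st : PySem.Set String × List String) (arg : String) : PySem.Set String × List String :=
  if PySem.Str.startswith arg "-fsanitize=" then
    decideNames true st (pySplitComma (pyPartitionAfterEq arg))
  else if PySem.Str.startswith arg "-fno-sanitize=" then
    decideNames false st (pySplitComma (pyPartitionAfterEq arg))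
  else st

def sanitizers_from_args_alt (args : List String) : List String :=
  PySem.List.sorted ((args.reverse.foldl stepB (PySem.Set.empty, [])).2) (fun x => x) false

-- ===== PRECONDITION & SPEC =====
def Spec_sanitizers_from_args (args : List String) (out : List String) : Prop := out = sanitizers_from_args_alt args
instance (args : List String) (out : List String) : Decidable (Spec_sanitizers_from_args args out) := by unfold Spec_sanitizers_from_args; infer_instance

-- ===== CLAIM (what is proved, stated in full; the proofs are below) =====
def Claim_equal_sanitizers_from_args : Prop := ∀ (args : List String), Dom_sanitizers_from_args args → Spec_sanitizers_from_args args (sanitizers_from_args args)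

-- ===== LEMMAS AND PROOFS =====

-- the names a flag mentions, and its polarity (some true = enable, some false = disable, none = irrelevant)
def namesOf (arg : String) : List String := pySplitComma (pyPartitionAfterEq arg)

def polOf (arg : String) : Option Bool :=
  if PySem.Str.startswith arg "-fsanitize=" then some true
  else if PySem.Str.startswith arg "-fno-sanitize=" then some false
  else none

-- polarity of the first flag in l that mentions x
def firstPol (l : List String) (x : String) : Option Bool :=
  match l with
  | [] => none
  | a :: t =>
    match polOf a with
    | some b => if x ∈ namesOf a then some b else firstPol t x
    | none => firstPol t x

theorem firstPol_append (u v : List String) (x : String) :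
    firstPol (u ++ v) x = (firstPol u x).or (firstPol v x) := by
  induction u with
  | nil => simp [firstPol]
  | cons a t ih =>
    simp only [List.cons_append, firstPol, ih]
    rcases polOf a with _ | b
    · rfl
    · by_cases h : x ∈ namesOf a <;> simp [h]

-- one step of A, characterised by the flag's polarity
theorem mem_stepA (s : PySem.Set String) (x a : String) :
    x ∈ stepA s a ↔ (firstPol [a] x = some true ∨ (firstPol [a] x = none ∧ x ∈ s)) := by
  have hf : firstPol [a] x =
      (match polOf a with
       | some b => if x ∈ namesOf a then some b else none
       | none => none) := rfl
  rw [hf]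
  unfold stepA polOf
  by_cases h1 : PySem.Str.startswith a "-fsanitize=" = true
  · rw [if_pos h1, if_pos h1]
    by_cases hm : x ∈ namesOf a
    · have hm' : x ∈ pySplitComma (pyPartitionAfterEq a) := hm
      simp [PySem.Set.mem_union, PySem.Set.mem_ofList, hm, hm']
    · have hm' : x ∉ pySplitComma (pyPartitionAfterEq a) := hm
      simp [PySem.Set.mem_union, PySem.Set.mem_ofList, hm, hm']
  · rw [if_neg h1, if_neg h1]
    by_cases h2 : PySem.Str.startswith a "-fno-sanitize=" = true
    · rw [if_pos h2, if_pos h2]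
      by_cases hm : x ∈ namesOf a
      · have hm' : x ∈ pySplitComma (pyPartitionAfterEq a) := hm
        simp [PySem.Set.mem_diff, PySem.Set.mem_ofList, hm, hm']
      · have hm' : x ∉ pySplitComma (pyPartitionAfterEq a) := hm
        simp [PySem.Set.mem_diff, PySem.Set.mem_ofList, hm, hm']
    · rw [if_neg h2, if_neg h2]
      simp

-- A's accumulated set, characterised by the LAST relevant flag (= first in the reversed list)
theorem memA (l : List String) (s : PySem.Set String) (x : String) :
    x ∈ l.foldl stepA s ↔
      (firstPol l.reverse x = some true ∨ (firstPol l.reverse x = none ∧ x ∈ s)) := by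
  induction l generalizing s with
  | nil => simp [firstPol]
  | cons a t ih =>
    rw [List.foldl_cons, ih (stepA s a), List.reverse_cons, firstPol_append]
    rcases hp : firstPol t.reverse x with _ | b
    · simpa using mem_stepA s x a
    · by_cases hb : b = true <;> simp [hb, Option.or]

theorem nodupA (l : List String) (s : PySem.Set String) (hs : s.Nodup) :
    (l.foldl stepA s).Nodup := by
  induction l generalizing s with
  | nil => exact hs
  | cons a t ih =>
    refine ih _ ?_
    unfold stepA
    split_ifs <;> first
      | exact PySem.Set.nodup_union _ _ hs
      | exact PySem.Set.nodup_diff _ _ hs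
      | exact hs

-- invariant of Source B's inner loop over one flag's names
theorem decideNames_inv (on : Bool) (ns : List String) (dec : PySem.Set String) (en : List String)
    (hsub : ∀ x, x ∈ en → x ∈ dec) (hnd : en.Nodup) :
    (∀ x, x ∈ (decideNames on (dec, en) ns).1 ↔ x ∈ dec ∨ x ∈ ns) ∧
    (∀ x, x ∈ (decideNames on (dec, en) ns).2 ↔ x ∈ en ∨ (on = true ∧ x ∉ dec ∧ x ∈ ns)) ∧
    (∀ x, x ∈ (decideNames on (dec, en) ns).2 → x ∈ (decideNames on (dec, en) ns).1) ∧
    (decideNames on (dec, en) ns).2.Nodup := by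
  induction ns generalizing dec en with
  | nil =>
    refine ⟨fun x => by simp [decideNames], fun x => by simp [decideNames], ?_, ?_⟩
    · simpa [decideNames] using hsub
    · simpa [decideNames] using hnd
  | cons n t ih =>
    by_cases hc : n ∈ dec
    · have hstep : decideNames on (dec, en) (n :: t) = decideNames on (dec, en) t := by
        simp [decideNames, hc]
      obtain ⟨h1, h2, h3, h4⟩ := ih dec en hsub hnd
      rw [hstep]
      refine ⟨fun x => ?_, fun x => ?_, h3, h4⟩
      · rw [h1 x]
        by_cases hxn : x = n
        · subst hxn; simp [hc]
        · simp [hxn]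
      · rw [h2 x]
        by_cases hxn : x = n
        · subst hxn; simp [hc]
        · simp [hxn]
    · have hne : n ∉ en := fun h => hc (hsub n h)
      cases on with
      | false =>
        have hstep : decideNames false (dec, en) (n :: t) =
            decideNames false (PySem.Set.add dec n, en) t := by
          simp [decideNames, hc]
        have hsub' : ∀ x, x ∈ en → x ∈ PySem.Set.add dec n := fun x hx =>
          (PySem.Set.mem_add _ _ _).2 (Or.inl (hsub x hx))
        obtain ⟨h1, h2, h3, h4⟩ := ih _ _ hsub' hnd
        rw [hstep]
        refine ⟨fun x => ?_, fun x => ?_, h3, h4⟩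
        · rw [h1 x, PySem.Set.mem_add]
          simp only [List.mem_cons]
          tauto
        · rw [h2 x]
          simp
      | true =>
        have hstep : decideNames true (dec, en) (n :: t) =
            decideNames true (PySem.Set.add dec n, en ++ [n]) t := by
          simp [decideNames, hc]
        have hsub' : ∀ x, x ∈ en ++ [n] → x ∈ PySem.Set.add dec n := by
          intro x hx
          rw [PySem.Set.mem_add]
          rcases List.mem_append.1 hx with hx | hx
          · exact Or.inl (hsub x hx)
          · exact Or.inr (List.mem_singleton.1 hx)
        have hnd' : (en ++ [n]).Nodup :=
          List.Nodup.append hnd (List.nodup_singleton n) (by simpa using hne)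
        obtain ⟨h1, h2, h3, h4⟩ := ih _ _ hsub' hnd'
        rw [hstep]
        refine ⟨fun x => ?_, fun x => ?_, h3, h4⟩
        · rw [h1 x, PySem.Set.mem_add]
          simp only [List.mem_cons]
          tauto
        · rw [h2 x, PySem.Set.mem_add]
          by_cases hxn : x = n
          · subst hxn; simp [hc, hne]
          · simp only [List.mem_append, List.mem_singleton, List.mem_cons, hxn,
              or_false, false_or, true_and]
            tauto

-- invariant of Source B's outer backward loop
theorem invB (l : List String) (dec : PySem.Set String) (en : List String)
    (hsub : ∀ x, x ∈ en → x ∈ dec) (hnd : en.Nodup) :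
    (∀ x, x ∈ (l.foldl stepB (dec, en)).1 ↔ x ∈ dec ∨ (firstPol l x).isSome) ∧
    (∀ x, x ∈ (l.foldl stepB (dec, en)).2 ↔ x ∈ en ∨ (x ∉ dec ∧ firstPol l x = some true)) ∧
    (∀ x, x ∈ (l.foldl stepB (dec, en)).2 → x ∈ (l.foldl stepB (dec, en)).1) ∧
    (l.foldl stepB (dec, en)).2.Nodup := by
  induction l generalizing dec en with
  | nil =>
    exact ⟨fun x => by simp [firstPol], fun x => by simp [firstPol], hsub, hnd⟩
  | cons a t ih =>
    have hfp : ∀ x, firstPol (a :: t) x =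
        match polOf a with
        | some b => if x ∈ namesOf a then some b else firstPol t x
        | none => firstPol t x := fun x => rfl
    rcases hpol : polOf a with _ | b
    · have hstep : stepB (dec, en) a = (dec, en) := by
        unfold polOf at hpol
        unfold stepB
        split_ifs at hpol ⊢ <;> simp_all
      rw [List.foldl_cons, hstep]
      obtain ⟨h1, h2, h3, h4⟩ := ih dec en hsub hnd
      refine ⟨fun x => ?_, fun x => ?_, h3, h4⟩
      · rw [h1 x, hfp x, hpol]
      · rw [h2 x, hfp x, hpol]
    · have hstep : stepB (dec, en) a = decideNames b (dec, en) (namesOf a) := by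
        unfold polOf at hpol
        unfold stepB
        split_ifs at hpol ⊢ <;> simp_all [namesOf]
      obtain ⟨g1, g2, g3, g4⟩ := decideNames_inv b (namesOf a) dec en hsub hnd
      obtain ⟨h1, h2, h3, h4⟩ := ih (decideNames b (dec, en) (namesOf a)).1
        (decideNames b (dec, en) (namesOf a)).2 g3 g4
      rw [List.foldl_cons, hstep, ← Prod.mk.eta (p := decideNames b (dec, en) (namesOf a))]
      refine ⟨fun x => ?_, fun x => ?_, h3, h4⟩
      · rw [h1 x, g1 x, hfp x, hpol]
        by_cases hm : x ∈ namesOf a <;> simp [hm] <;> tauto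
      · rw [h2 x, g2 x, g1 x, hfp x, hpol]
        by_cases hm : x ∈ namesOf a <;> rcases b with _ | _ <;> simp [hm] <;> tauto

-- ===== VERDICT (by name: the statement is the Claim_ definition above) =====
theorem sanitizers_from_args_spec : Claim_equal_sanitizers_from_args := by
  intro args _
  unfold Spec_sanitizers_from_args sanitizers_from_args sanitizers_from_args_alt
  obtain ⟨_, hmem, _, hnd⟩ := invB args.reverse PySem.Set.empty [] (by simp) (by simp)
  apply PySem.List.sorted_eq_sorted_of_perm _ _ _ (fun a b h => h)
  rw [List.perm_ext_iff_of_nodup (nodupA args PySem.Set.empty (by simp [PySem.Set.empty])) hnd]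
  intro x
  rw [memA, hmem]
  simp [PySem.Set.empty]
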